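-- pv_equiv track=rewrite | github.com/yred/euler | python/problem_120.py | maxrem
-- ===== SOURCE A (Python) =====
-- from itertools import count
--
-- def maxrem(a):
--     """
--     Returns the maximum remainder r_max, where for any natural numbers n:
--
--                 r ≡ (a−1)^n + (a+1)^n mod a²
--     """
--     rems = []
--
--     for i in count(1):
--         rem = 2*i*a % (a*a)
--
--         if rem in rems:
--             return max(rems)
--         else:
--             rems.append(rem)
-- ===== SOURCE B (Python) =====
-- def maxrem(a):
--     """
--     Returns the maximum remainder r_max, where for any natural numbers n:
--
--                 r ≡ (a−1)^n + (a+1)^n mod a²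
--
--     Closed form: the remainders 2*i*a mod a^2 are exactly the multiples of
--     m = |a| (m odd) resp. 2*m (m even) below a^2, so the maximum is
--     a^2 - m = m*(m-1) (m odd) resp. a^2 - 2*m = m*(m-2) (m even).
--     """
--     m = abs(a)
--     return m * (m - 1) if m % 2 else m * (m - 2)
-- ===== Notes on version B (the rewrite author's own statement) =====
-- stated objective: faster
-- what changed: replaces the collect-remainders-until-repeat loop (with a linear membership scan per step) by the O(1) closed form m*(m-1) for odd m=|a| and m*(m-2) for even m
-- outside the precondition, e.g. on maxrem(0): A raises ZeroDivisionError, B returns 0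
import Mathlib
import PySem

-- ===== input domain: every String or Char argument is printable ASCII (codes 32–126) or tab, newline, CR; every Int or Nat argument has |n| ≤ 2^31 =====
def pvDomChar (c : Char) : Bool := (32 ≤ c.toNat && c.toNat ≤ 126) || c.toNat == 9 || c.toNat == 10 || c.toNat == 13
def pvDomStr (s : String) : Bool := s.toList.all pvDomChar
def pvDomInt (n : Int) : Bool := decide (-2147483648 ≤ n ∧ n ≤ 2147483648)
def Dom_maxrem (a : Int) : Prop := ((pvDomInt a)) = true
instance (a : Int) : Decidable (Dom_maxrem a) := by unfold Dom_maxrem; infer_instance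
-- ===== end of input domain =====

-- B replaces A's collect-until-repeat loop by the O(1) closed form m*(m-1) / m*(m-2), m = |a|.

-- ===== PORT A =====
-- The Python `for i in count(1)` loop terminates at the first repeated remainder;
-- the port carries a fuel counter, proved large enough below (the fuel branch is
-- never reached for a ≠ 0).
def maxremLoop (a : Int) (i : Nat) (rems : List Int) : Nat → Int
  | 0 => 0   -- unreachable: fuel chosen ≥ period + 1 (proved in the lemmas)
  | fuel + 1 =>
    let rem := PySem.Int.mod (2 * (i : Int) * a) (a * a)
    if rem ∈ rems then
      -- Python max(rems); rems is nonempty whenever this branch is reached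
      (PySem.List.max? rems (fun x => x)).getD 0
    else
      maxremLoop a (i + 1) (rems ++ [rem]) fuel

def maxrem (a : Int) : Int := maxremLoop a 1 [] (a.natAbs * a.natAbs + 2)

-- ===== PORT B =====
def maxrem_alt (a : Int) : Int :=
  let m := |a|
  if PySem.Int.mod m 2 ≠ 0 then m * (m - 1) else m * (m - 2)

-- ===== PRECONDITION & SPEC =====
-- Pre_ excludes exactly a = 0, where Python A raises ZeroDivisionError (% by a*a = 0).
def Pre_maxrem (a : Int) : Prop := a ≠ 0
instance (a : Int) : Decidable (Pre_maxrem a) := by unfold Pre_maxrem; infer_instance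
def pvWitness_maxrem : Int := 3

def Spec_maxrem (a : Int) (out : Int) : Prop := out = maxrem_alt a
instance (a : Int) (out : Int) : Decidable (Spec_maxrem a out) := by unfold Spec_maxrem; infer_instance

-- ===== CLAIM (what is proved, stated in full; the proofs are below) =====
def Claim_equal_maxrem : Prop := ∀ (a : Int), Dom_maxrem a → Pre_maxrem a → Spec_maxrem a (maxrem a)

-- ===== LEMMAS AND PROOFS =====

-- the remainder sequence, the period p, and the common divisor g of the remainders
def pvR (a : Int) (i : Nat) : Int := (2 * (i : Int) * a) % (a * a)
def pvP (a : Int) : Nat := if a.natAbs % 2 = 1 then a.natAbs else a.natAbs / 2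
def pvG (a : Int) : Int := if a.natAbs % 2 = 1 then (a.natAbs : Int) else 2 * (a.natAbs : Int)

theorem pv_q_pos {a : Int} (ha : a ≠ 0) : 0 < a * a := mul_self_pos.mpr ha

theorem pv_q_eq (a : Int) : a * a = (a.natAbs : Int) * (a.natAbs : Int) := by
  rcases Int.natAbs_eq a with h | h <;> nlinarith [h]

theorem pv_p_pos {a : Int} (ha : a ≠ 0) : 1 ≤ pvP a := by
  unfold pvP
  have : 1 ≤ a.natAbs := by omega
  split <;> omega

-- period: q divides 2*p*a
theorem pv_period_dvd (a : Int) : (a * a) ∣ 2 * (pvP a : Int) * a := by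
  unfold pvP
  rcases Int.natAbs_eq a with h | h <;> split
  · exact ⟨2, by nlinarith [h]⟩
  · rename_i he
    have h2 : (((a.natAbs / 2 : Nat)) : Int) * 2 = (a.natAbs : Int) := by
      omega
    exact ⟨1, by nlinarith [h, h2]⟩
  · exact ⟨-2, by nlinarith [h]⟩
  · rename_i he
    have h2 : (((a.natAbs / 2 : Nat)) : Int) * 2 = (a.natAbs : Int) := by
      omega
    exact ⟨-1, by nlinarith [h, h2]⟩

theorem pv_periodic (a : Int) (i : Nat) : pvR a (i + pvP a) = pvR a i := by
  obtain ⟨c, hc⟩ := pv_period_dvd a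
  unfold pvR
  have : 2 * ((i + pvP a : Nat) : Int) * a = 2 * (i : Int) * a + (a * a) * c := by
    push_cast
    nlinarith [hc]
  rw [this, Int.add_mul_emod_self_left]

-- injectivity: no repeat among pvR a 1 .. pvR a p
theorem pv_inj {a : Int} (ha : a ≠ 0) {i j : Nat} (hi : 1 ≤ i) (hij : i < j)
    (hj : j ≤ pvP a) : pvR a i ≠ pvR a j := by
  intro heq
  have hd : (a * a) ∣ 2 * ((j : Int) - (i : Int)) * a := by
    have h0 : (2 * (j : Int) * a - 2 * (i : Int) * a) % (a * a) = 0 := by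
      have := (Int.emod_eq_emod_iff_emod_sub_eq_zero).mp heq.symm
      exact this
    have h1 := Int.dvd_of_emod_eq_zero h0
    have : 2 * ((j : Int) - (i : Int)) * a = 2 * (j : Int) * a - 2 * (i : Int) * a := by ring
    rw [this]; exact h1
  -- pass to natAbs
  have hdn : a.natAbs * a.natAbs ∣ 2 * (j - i) * a.natAbs := by
    have h1 := Int.natAbs_dvd_natAbs.mpr hd
    have he : ((j : Int) - (i : Int)).natAbs = j - i := by omega
    simpa [Int.natAbs_mul, he] using h1
  have hm : 1 ≤ a.natAbs := by omega
  have hmd : a.natAbs ∣ 2 * (j - i) :=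
    (Nat.mul_dvd_mul_iff_right (by omega : 0 < a.natAbs)).mp hdn
  unfold pvP at hj
  by_cases hodd : a.natAbs % 2 = 1
  · rw [if_pos hodd] at hj
    have hco : Nat.Coprime a.natAbs 2 := by
      rw [Nat.coprime_two_right]
      exact Nat.odd_iff.mpr hodd
    have : a.natAbs ∣ (j - i) := hco.dvd_of_dvd_mul_left hmd
    have := Nat.le_of_dvd (by omega) this
    omega
  · rw [if_neg hodd] at hj
    obtain ⟨t, ht⟩ : ∃ t, a.natAbs = 2 * t := ⟨a.natAbs / 2, by omega⟩
    have : t ∣ (j - i) := by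
      have : 2 * t ∣ 2 * (j - i) := ht ▸ hmd
      exact (Nat.mul_dvd_mul_iff_left (by norm_num : 0 < 2)).mp this
    have := Nat.le_of_dvd (by omega) this
    omega

-- every remainder is a multiple of g, hence ≤ q - g
theorem pv_g_dvd_two_a (a : Int) : pvG a ∣ 2 * a := by
  unfold pvG
  rcases Int.natAbs_eq a with h | h <;> split
  · exact ⟨2, by nlinarith [h]⟩
  · exact ⟨1, by nlinarith [h]⟩
  · exact ⟨-2, by nlinarith [h]⟩
  · exact ⟨-1, by nlinarith [h]⟩

theorem pv_g_dvd_q (a : Int) : pvG a ∣ a * a := by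
  rw [pv_q_eq a]
  unfold pvG
  split
  · exact ⟨(a.natAbs : Int), by ring⟩
  · rename_i he
    have h2 : (((a.natAbs / 2 : Nat)) : Int) * 2 = (a.natAbs : Int) := by omega
    exact ⟨((a.natAbs / 2 : Nat) : Int), by nlinarith [h2]⟩

theorem pv_g_dvd_r (a : Int) (i : Nat) : pvG a ∣ pvR a i := by
  unfold pvR
  rw [Int.emod_def]
  have h1 : pvG a ∣ 2 * (i : Int) * a := by
    obtain ⟨c, hc⟩ := pv_g_dvd_two_a a
    exact ⟨(i : Int) * c, by linear_combination (i : Int) * hc⟩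
  exact dvd_sub h1 ((pv_g_dvd_q a).mul_right _)

theorem pv_r_le {a : Int} (ha : a ≠ 0) (i : Nat) : pvR a i ≤ a * a - pvG a := by
  have hq := pv_q_pos ha
  have hlt : pvR a i < a * a := Int.emod_lt_of_pos _ hq
  have hge : 0 ≤ pvR a i := Int.emod_nonneg _ (by positivity)
  have hdvd : pvG a ∣ (a * a - pvR a i) := dvd_sub (pv_g_dvd_q a) (pv_g_dvd_r a i)
  have := Int.le_of_dvd (by omega) hdvd
  omega

-- attainment: for |a| ≥ 3 some index in [1, p] realises q - g
theorem pv_attain {a : Int} (hm : 3 ≤ a.natAbs) :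
    ∃ i0, 1 ≤ i0 ∧ i0 ≤ pvP a ∧ pvR a i0 = a * a - pvG a := by
  have ha : a ≠ 0 := by omega
  by_cases hodd : a.natAbs % 2 = 1
  · obtain ⟨k, hk⟩ : ∃ k, a.natAbs = 2 * k + 1 := ⟨a.natAbs / 2, by omega⟩
    have hk1 : (1 : Int) ≤ (k : Int) := by omega
    have hN : ((a.natAbs : Int)) = 2 * (k : Int) + 1 := by rw [hk]; push_cast; ring
    have hQ : a * a = (2 * (k : Int) + 1) * (2 * (k : Int) + 1) := by rw [pv_q_eq a, hN]
    have hg : pvG a = (a.natAbs : Int) := by unfold pvG; rw [if_pos hodd]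
    have hp : pvP a = a.natAbs := by unfold pvP; rw [if_pos hodd]
    rcases Int.natAbs_eq a with h | h
    · have hA : a = 2 * (k : Int) + 1 := by rw [h, hN]
      refine ⟨k, by omega, by omega, ?_⟩
      unfold pvR
      rw [hg, hN, hQ]
      have hnum : 2 * (k : Int) * a = ((2 * (k : Int) + 1) * (2 * (k : Int) + 1) - (2 * (k : Int) + 1)) := by
        rw [hA]; ring
      rw [hnum, Int.emod_eq_of_lt (by nlinarith) (by nlinarith)]
    · have hA : a = -(2 * (k : Int) + 1) := by rw [h, hN]
      refine ⟨k + 1, by omega, by omega, ?_⟩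
      unfold pvR
      rw [hg, hN, hQ]
      push_cast
      have hnum : 2 * ((k : Int) + 1) * a
          = ((2 * (k : Int) + 1) * (2 * (k : Int) + 1) - (2 * (k : Int) + 1))
            + (2 * (k : Int) + 1) * (2 * (k : Int) + 1) * (-2) := by
        rw [hA]; ring
      rw [hnum, Int.add_mul_emod_self_left, Int.emod_eq_of_lt (by nlinarith) (by nlinarith)]
  · obtain ⟨k, hk⟩ : ∃ k, a.natAbs = 2 * k := ⟨a.natAbs / 2, by omega⟩
    have hk2 : (2 : Int) ≤ (k : Int) := by omega
    have hN : ((a.natAbs : Int)) = 2 * (k : Int) := by rw [hk]; push_cast; ring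
    have hQ : a * a = (2 * (k : Int)) * (2 * (k : Int)) := by rw [pv_q_eq a, hN]
    have hg : pvG a = 2 * ((a.natAbs : Int)) := by unfold pvG; rw [if_neg hodd]
    have hp : pvP a = k := by unfold pvP; rw [if_neg hodd]; omega
    rcases Int.natAbs_eq a with h | h
    · have hA : a = 2 * (k : Int) := by rw [h, hN]
      refine ⟨k - 1, by omega, by omega, ?_⟩
      unfold pvR
      rw [hg, hN, hQ]
      have hc : ((k - 1 : Nat) : Int) = (k : Int) - 1 := by omega
      rw [hc]
      have hnum : 2 * ((k : Int) - 1) * a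
          = ((2 * (k : Int)) * (2 * (k : Int)) - 2 * (2 * (k : Int))) := by
        rw [hA]; ring
      rw [hnum, Int.emod_eq_of_lt (by nlinarith) (by nlinarith)]
    · have hA : a = -(2 * (k : Int)) := by rw [h, hN]
      refine ⟨1, le_refl 1, by omega, ?_⟩
      unfold pvR
      rw [hg, hN, hQ]
      push_cast
      have hnum : 2 * a
          = ((2 * (k : Int)) * (2 * (k : Int)) - 2 * (2 * (k : Int)))
            + (2 * (k : Int)) * (2 * (k : Int)) * (-1) := by
        rw [hA]; ring
      rw [hnum, Int.add_mul_emod_self_left, Int.emod_eq_of_lt (by nlinarith) (by nlinarith)]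

-- the port's remainder is pvR
theorem pv_mod_eq {a : Int} (ha : a ≠ 0) (x : Int) :
    PySem.Int.mod x (a * a) = x % (a * a) :=
  PySem.Int.mod_eq_emod_of_pos (pv_q_pos ha)

-- max of the full first-period list
theorem pv_max_eq {a : Int} (ha : a ≠ 0) (hm : 3 ≤ a.natAbs) :
    (PySem.List.max? ((List.range (pvP a)).map (fun k => pvR a (k + 1))) (fun x => x)).getD 0
      = a * a - pvG a := by
  set L := (List.range (pvP a)).map (fun k => pvR a (k + 1)) with hL
  have hne : L ≠ [] := by
    have := pv_p_pos ha
    simp [hL, List.range_eq_nil]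
    omega
  obtain ⟨x, hx⟩ : ∃ x, PySem.List.max? L (fun x => x) = some x := by
    rcases hmax : PySem.List.max? L (fun x => x) with _ | x
    · exact absurd ((PySem.List.max?_eq_none_iff L (fun x => x)).mp hmax) hne
    · exact ⟨x, rfl⟩
  obtain ⟨i0, hi01, hi0p, hi0v⟩ := pv_attain hm
  have hmem : (a * a - pvG a) ∈ L := by
    rw [hL]
    refine List.mem_map.mpr ⟨i0 - 1, ?_, ?_⟩
    · exact List.mem_range.mpr (by omega)
    · have : i0 - 1 + 1 = i0 := by omega
      rw [this, hi0v]
  have hxmem := PySem.List.max?_mem hx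
  have hxmax := PySem.List.max?_isMax hx
  have hx_le : x ≤ a * a - pvG a := by
    obtain ⟨k, _, hk⟩ := List.mem_map.mp (hL ▸ hxmem)
    rw [← hk]; exact pv_r_le ha _
  have h_le_x : a * a - pvG a ≤ x := hxmax _ hmem
  rw [hx]
  simp
  omega

-- loop invariant: from step i with rems = first i-1 remainders, the loop returns q - g
theorem pv_loop_inv {a : Int} (ha : a ≠ 0) (hm : 3 ≤ a.natAbs) :
    ∀ fuel i, 1 ≤ i → i ≤ pvP a + 1 → pvP a + 2 - i ≤ fuel →
      maxremLoop a i ((List.range (i - 1)).map (fun k => pvR a (k + 1))) fuel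
        = a * a - pvG a := by
  intro fuel
  induction fuel with
  | zero => intro i h1 h2 h3; omega
  | succ fuel ih =>
    intro i h1 h2 h3
    rw [maxremLoop]
    simp only [pv_mod_eq ha]
    have hrem : (2 * (i : Int) * a) % (a * a) = pvR a i := rfl
    rw [hrem]
    by_cases hend : i = pvP a + 1
    · have hmem : pvR a i ∈ (List.range (i - 1)).map (fun k => pvR a (k + 1)) := by
        have hp1 : pvR a i = pvR a 1 := by
          rw [hend]
          have := pv_periodic a 1
          rw [Nat.add_comm] at this
          exact this
        rw [hp1]
        refine List.mem_map.mpr ⟨0, List.mem_range.mpr (by have := pv_p_pos ha; omega), rfl⟩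
      rw [if_pos hmem]
      have : i - 1 = pvP a := by omega
      rw [this]
      exact pv_max_eq ha hm
    · have hi_le : i ≤ pvP a := by omega
      have hnot : pvR a i ∉ (List.range (i - 1)).map (fun k => pvR a (k + 1)) := by
        intro hmem
        obtain ⟨k, hk, hkv⟩ := List.mem_map.mp hmem
        have hk' := List.mem_range.mp hk
        exact pv_inj ha (by omega : 1 ≤ k + 1) (by omega : k + 1 < i) hi_le hkv
      rw [if_neg hnot]
      have happ : (List.range (i - 1)).map (fun k => pvR a (k + 1)) ++ [pvR a i]
          = (List.range (i + 1 - 1)).map (fun k => pvR a (k + 1)) := by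
        have h2 : i + 1 - 1 = (i - 1) + 1 := by omega
        rw [h2, List.range_succ, List.map_append]
        simp only [List.map_cons, List.map_nil]
        have : i - 1 + 1 = i := by omega
        rw [this]
      rw [happ]
      exact ih (i + 1) (by omega) (by omega) (by omega)

-- B's closed form is q - g
theorem pv_alt_eq (a : Int) : maxrem_alt a = a * a - pvG a := by
  unfold maxrem_alt
  have habs : |a| = (a.natAbs : Int) := Int.abs_eq_natAbs a
  have hmod : PySem.Int.mod ((a.natAbs : Int)) 2 = ((a.natAbs % 2 : Nat) : Int) := by
    exact_mod_cast PySem.Int.mod_natCast a.natAbs 2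
  simp only [habs, hmod]
  unfold pvG
  rw [pv_q_eq a]
  by_cases hodd : a.natAbs % 2 = 1
  · rw [if_pos (by rw [hodd]; norm_num), if_pos hodd]; ring
  · rw [if_neg (by
      have : a.natAbs % 2 = 0 := by omega
      rw [this]; norm_num), if_neg hodd]
    ring

theorem pv_main {a : Int} (ha : a ≠ 0) (hm : 3 ≤ a.natAbs) : maxrem a = maxrem_alt a := by
  unfold maxrem
  have h0 : ([] : List Int) = (List.range (1 - 1)).map (fun k => pvR a (k + 1)) := by simp
  rw [h0, pv_loop_inv ha hm _ 1 (le_refl 1) (by omega)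
    (by
      have hp : pvP a ≤ a.natAbs := by unfold pvP; split <;> omega
      have : a.natAbs ≤ a.natAbs * a.natAbs := Nat.le_mul_of_pos_left _ (by omega)
      omega), pv_alt_eq a]

-- ===== VERDICT (by name: the statement is the Claim_ definition above) =====
theorem maxrem_spec : Claim_equal_maxrem := by
  intro a hdom hpre
  unfold Spec_maxrem
  by_cases hm : 3 ≤ a.natAbs
  · exact pv_main hpre hm
  · have : a = 1 ∨ a = -1 ∨ a = 2 ∨ a = -2 := by
      unfold Pre_maxrem at hpre; omega
    rcases this with h | h | h | h <;> rw [h] <;> decide
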